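-- pv_equiv track=rewrite | github.com/daehwannam/python-library | dhnamlib/pylib/iteration.py | chunk_sizes
-- ===== SOURCE A (Python) =====
-- import itertools
--
-- def chunk_sizes(total_num, num_chunks):
--     '''
--     Example:
--
--     >>> chunks = tuple(chunk_sizes(20, 6))
--     >>> chunks
--     (4, 4, 3, 3, 3, 3)
--     >>> sum(chunks)
--     20
--     '''
--     assert total_num >= num_chunks
--
--     if total_num % num_chunks > 0:
--         max_chunk_size = total_num // num_chunks + 1
--         for i in range(num_chunks):
--             if i + (max_chunk_size - 1) * num_chunks < total_num:
--                 yield max_chunk_size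
--             else:
--                 yield max_chunk_size - 1
--     else:
--         yield from itertools.repeat(total_num // num_chunks, num_chunks)
-- ===== SOURCE B (Python) =====
-- def chunk_sizes(total_num, num_chunks):
--     assert total_num >= num_chunks
--     n, k = total_num, num_chunks
--     while k > 0:
--         size = -(-n // k)  # ceiling of remaining items over remaining chunks
--         yield size
--         n -= size
--         k -= 1
-- ===== Notes on version B (the rewrite author's own statement) =====
-- stated objective: alternative
-- what changed: Replaces A's precomputed-quotient loop with a per-index threshold test by a greedy peeling loop: each step yields the ceiling of remaining items over remaining chunks and recurses on the shrunken state, with no divmod of the whole input.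
import Mathlib
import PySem

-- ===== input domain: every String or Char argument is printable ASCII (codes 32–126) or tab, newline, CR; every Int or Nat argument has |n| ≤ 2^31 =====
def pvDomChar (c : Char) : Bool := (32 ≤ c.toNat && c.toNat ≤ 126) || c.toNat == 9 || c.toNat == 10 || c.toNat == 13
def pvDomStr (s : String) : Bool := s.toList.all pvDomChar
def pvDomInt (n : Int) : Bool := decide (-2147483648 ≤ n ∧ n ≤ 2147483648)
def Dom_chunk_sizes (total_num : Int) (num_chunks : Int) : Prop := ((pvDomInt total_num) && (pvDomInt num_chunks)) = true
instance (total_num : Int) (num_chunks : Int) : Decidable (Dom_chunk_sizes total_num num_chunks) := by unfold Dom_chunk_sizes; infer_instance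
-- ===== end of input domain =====

-- B replaces A's precomputed-quotient loop (threshold test per index) by a greedy peeling
-- loop: each step yields the ceiling of remaining items over remaining chunks; objective: alternative.

-- ===== PORT A =====
-- loop 'for i in range(num_chunks): yield …' → map over pyRange; itertools.repeat(x, k) → List.replicate
def chunk_sizes (total_num : Int) (num_chunks : Int) : List Int :=
  if PySem.Int.mod total_num num_chunks > 0 then
    let max_chunk_size := PySem.Int.floordiv total_num num_chunks + 1
    (PySem.List.pyRange 0 num_chunks 1).map
      (fun i => if i + (max_chunk_size - 1) * num_chunks < total_num
                then max_chunk_size else max_chunk_size - 1)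
  else
    List.replicate num_chunks.toNat (PySem.Int.floordiv total_num num_chunks)

-- ===== PORT B =====
-- 'while k > 0: yield -(-n // k); n -= size; k -= 1' → structural recursion on the
-- iteration count k.toNat, carrying (n, k) exactly as the loop does
def chunkAltGo (n : Int) (k : Int) : Nat → List Int
  | 0 => []
  | fuel + 1 =>
    if k > 0 then
      let size := -(PySem.Int.floordiv (-n) k)
      size :: chunkAltGo (n - size) (k - 1) fuel
    else []

def chunk_sizes_alt (total_num : Int) (num_chunks : Int) : List Int :=
  chunkAltGo total_num num_chunks num_chunks.toNat

-- ===== PRECONDITION & SPEC =====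
-- Pre_ excludes exactly the inputs where the Python A raises: num_chunks = 0 (ZeroDivisionError)
-- and total_num < num_chunks (AssertionError).
def Pre_chunk_sizes (total_num : Int) (num_chunks : Int) : Prop :=
  num_chunks ≠ 0 ∧ total_num ≥ num_chunks
instance (total_num : Int) (num_chunks : Int) : Decidable (Pre_chunk_sizes total_num num_chunks) := by unfold Pre_chunk_sizes; infer_instance

def pvWitness_chunk_sizes : Int × Int := (20, 6)

def Spec_chunk_sizes (total_num : Int) (num_chunks : Int) (out : List Int) : Prop := out = chunk_sizes_alt total_num num_chunks
instance (total_num : Int) (num_chunks : Int) (out : List Int) : Decidable (Spec_chunk_sizes total_num num_chunks out) := by unfold Spec_chunk_sizes; infer_instance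

-- ===== CLAIM (what is proved, stated in full; the proofs are below) =====
def Claim_equal_chunk_sizes : Prop := ∀ (total_num : Int) (num_chunks : Int), Dom_chunk_sizes total_num num_chunks → Pre_chunk_sizes total_num num_chunks → Spec_chunk_sizes total_num num_chunks (chunk_sizes total_num num_chunks)

-- ===== LEMMAS AND PROOFS =====

-- mapping a threshold test over List.range produces two constant runs
theorem range_map_ite_threshold (k : Nat) (r : Int) (a b : Int)
    (h0 : 0 ≤ r) (hk : r ≤ (k : Int)) :
    (List.range k).map (fun i : Nat => if (i : Int) < r then a else b) =
      List.replicate r.toNat a ++ List.replicate (k - r.toNat) b := by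
  induction k with
  | zero =>
      have : r = 0 := le_antisymm (by exact_mod_cast hk) h0
      simp [this]
  | succ k ih =>
      rcases (show r ≤ (k : Int) ∨ (k : Int) < r by omega) with h | h
      · rw [List.range_succ, List.map_append, ih h]
        have hkr : ¬ ((k : Int) < r) := not_lt.mpr h
        have hle : r.toNat ≤ k := by omega
        simp only [List.map_cons, List.map_nil, hkr, if_false]
        rw [List.append_assoc]
        congr 1
        have : k + 1 - r.toNat = (k - r.toNat) + 1 := by omega
        rw [this, ← List.replicate_succ' ]
      · have hr : r = (k : Int) + 1 := le_antisymm (by exact_mod_cast hk) h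
        have hall : ∀ i ∈ List.range (k + 1), (fun i : Nat => if (i : Int) < r then a else b) i = a := by
          intro i hi
          have : i < k + 1 := List.mem_range.mp hi
          simp only [if_pos (show (i : Int) < r by rw [hr]; exact_mod_cast this)]
        rw [List.map_congr_left hall]
        have hrt : r.toNat = k + 1 := by omega
        simp [hrt, List.map_const']

-- A's output equals the two-run form  replicate r (q+1) ++ replicate (k-r) q  with q, r = divmod
theorem chunk_sizes_two_runs (total_num num_chunks : Int) (hn : 0 < num_chunks) :
    chunk_sizes total_num num_chunks =
      List.replicate (PySem.Int.mod total_num num_chunks).toNat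
          (PySem.Int.floordiv total_num num_chunks + 1) ++
        List.replicate (num_chunks - PySem.Int.mod total_num num_chunks).toNat
          (PySem.Int.floordiv total_num num_chunks) := by
  set q := PySem.Int.floordiv total_num num_chunks with hq
  set r := PySem.Int.mod total_num num_chunks with hr
  have hqr : q * num_chunks + r = total_num := PySem.Int.floordiv_mul_add_mod total_num num_chunks
  have h0 : 0 ≤ r := PySem.Int.mod_nonneg (a := total_num) hn
  have hlt : r < num_chunks := PySem.Int.mod_lt (a := total_num) hn
  unfold chunk_sizes
  rw [← hq, ← hr]
  by_cases hpos : r > 0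
  · rw [if_pos hpos]
    show (PySem.List.pyRange 0 num_chunks 1).map
          (fun i => if i + (q + 1 - 1) * num_chunks < total_num
                    then q + 1 else q + 1 - 1) =
        List.replicate r.toNat (q + 1) ++ List.replicate (num_chunks - r).toNat q
    have hsimp : (fun i => if i + (q + 1 - 1) * num_chunks < total_num
                  then q + 1 else q + 1 - 1) =
        (fun i : Int => if i < r then q + 1 else q) := by
      funext i
      simp only [show q + 1 - 1 = q from by ring]
      by_cases h : i < r
      · rw [if_pos h, if_pos (by omega)]
      · rw [if_neg h, if_neg (by omega)]
    rw [hsimp, PySem.List.pyRange_one, List.map_map]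
    have hfun : ((fun i : Int => if i < r then q + 1 else q) ∘ fun k : Nat => (0 : Int) + k) =
        (fun k : Nat => if (k : Int) < r then q + 1 else q) := by
      funext k; simp
    rw [hfun]
    have hk : r ≤ (((num_chunks - 0).toNat : Nat) : Int) := by omega
    rw [range_map_ite_threshold (num_chunks - 0).toNat r (q + 1) q h0 hk]
    congr 1
    congr 1
    omega
  · rw [if_neg hpos]
    have h3 : r.toNat = 0 := by omega
    have h4 : (num_chunks - r).toNat = num_chunks.toNat := by omega
    simp [h3, h4]

-- B's peeling loop also produces the two-run form: with n = q*m + r, 0 ≤ r (< m or = 0),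
-- the first ceiling is q+1 while r > 0 and q afterwards
theorem chunkAltGo_two_runs (m : Nat) (q r : Int)
    (h0 : 0 ≤ r) (h1 : r = 0 ∨ r < (m : Int)) :
    chunkAltGo (q * m + r) m m =
      List.replicate r.toNat (q + 1) ++ List.replicate (m - r.toNat) q := by
  induction m generalizing q r with
  | zero =>
      have : r = 0 := by omega
      simp [chunkAltGo, this]
  | succ m ih =>
      rw [chunkAltGo]
      rw [if_pos (by exact_mod_cast Nat.succ_pos m)]
      by_cases hpos : 0 < r
      · have hlt : r < (m : Int) + 1 := by
          rcases h1 with h | h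
          · omega
          · exact_mod_cast h
        have hsize : -(PySem.Int.floordiv (-(q * (↑m + 1) + r)) (↑m + 1)) = q + 1 := by
          rw [PySem.Int.neg_floordiv_neg_eq_iff_of_pos (by positivity)]
          constructor <;> nlinarith
        have harg : q * (↑m + 1) + r - (q + 1) = q * ↑m + (r - 1) := by ring
        push_cast
        rw [hsize, harg]
        have hstep : ((m : Int) + 1 - 1) = (m : Int) := by ring
        rw [hstep]
        rw [ih q (r - 1) (by omega) (by omega)]
        have hr1 : r.toNat = (r - 1).toNat + 1 := by omega
        have hr2 : m + 1 - ((r - 1).toNat + 1) = m - (r - 1).toNat := by omega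
        rw [hr1, hr2, List.replicate_succ, List.cons_append]
      · have hr0 : r = 0 := by omega
        subst hr0
        have hsize : -(PySem.Int.floordiv (-(q * (↑m + 1) + 0)) (↑m + 1)) = q := by
          rw [PySem.Int.neg_floordiv_neg_eq_iff_of_pos (by positivity)]
          constructor <;> nlinarith
        have harg : q * (↑m + 1) + 0 - q = q * ↑m + 0 := by ring
        push_cast
        rw [hsize, harg]
        have hstep : ((m : Int) + 1 - 1) = (m : Int) := by ring
        rw [hstep]
        rw [ih q 0 le_rfl (Or.inl rfl)]
        simp [List.replicate_succ]

theorem chunk_sizes_eq (total_num num_chunks : Int)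
    (hpre : Pre_chunk_sizes total_num num_chunks) :
    chunk_sizes total_num num_chunks = chunk_sizes_alt total_num num_chunks := by
  obtain ⟨hne, hge⟩ := hpre
  rcases (show num_chunks < 0 ∨ 0 < num_chunks by omega) with hn | hn
  · -- num_chunks < 0 : r ≤ 0, both sides empty
    have hb := PySem.Int.mod_neg_bounds (a := total_num) hn
    unfold chunk_sizes chunk_sizes_alt
    have : ¬ (PySem.Int.mod total_num num_chunks > 0) := by omega
    rw [if_neg this]
    have h1 : num_chunks.toNat = 0 := by omega
    simp [h1, chunkAltGo]
  · -- num_chunks > 0 : both sides are the same two constant runs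
    set q := PySem.Int.floordiv total_num num_chunks with hq
    set r := PySem.Int.mod total_num num_chunks with hr
    have hqr : q * num_chunks + r = total_num := PySem.Int.floordiv_mul_add_mod total_num num_chunks
    have h0 : 0 ≤ r := PySem.Int.mod_nonneg (a := total_num) hn
    have hlt : r < num_chunks := PySem.Int.mod_lt (a := total_num) hn
    rw [chunk_sizes_two_runs total_num num_chunks hn, ← hq, ← hr]
    unfold chunk_sizes_alt
    have hcast : ((num_chunks.toNat : Nat) : Int) = num_chunks := by omega
    have := chunkAltGo_two_runs num_chunks.toNat q r h0 (by omega)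
    rw [hcast, hqr] at this
    rw [this]
    congr 2
    omega

-- ===== VERDICT (by name: the statement is the Claim_ definition above) =====
theorem chunk_sizes_spec : Claim_equal_chunk_sizes := by
  intro total_num num_chunks _ hpre
  unfold Spec_chunk_sizes
  exact chunk_sizes_eq total_num num_chunks hpre
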